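-- pv_equiv track=rewrite | github.com/Thegreenmoray/Go_with_ko_rules_two_players | Rules.py | bfs
-- ===== SOURCE A (Python) =====
-- from queue import Queue
--
-- def bfs(board,x,y,visitboard):
--     queue = Queue()
--     queue.put((x,y))
--     points=1
--     #whogetspoints=' ' #intially nobody
--     bordering_players = set()  # Stores 'X', 'O', or both
--     while not queue.empty():
--      x,y=queue.get()
--      directions = [(1, 0), (-1, 0), (0, 1), (0, -1)]
--      for dx, dy in directions:
--         nx, ny = x + dx, y + dy
--         if not is_out_of_bounds(board, nx, ny) and visitboard[nx][ny] == False: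
--             if board[nx][ny] == ' ':
--              visitboard[nx][ny] = True
--              queue.put((nx,ny))
--              points += 1
--              pass
--             elif board[nx][ny] == 'X':
--                 bordering_players.add('X')
--             elif board[nx][ny] == 'O':
--                 bordering_players.add('O')
--
--     if len(bordering_players) == 1:
--         whogetspoints = bordering_players.pop()  # Only one color borders it
--     else:
--         whogetspoints = ' '  # Neutral (no stones, multiple colors, or edge)
--
--
--     return visitboard,points,whogetspoints
--
-- def is_out_of_bounds(board,x,y):
--     return x>=len(board) or y>=len(board) or x<0 or y<0
-- ===== SOURCE B (Python) =====
-- def bfs(board, x, y, visitboard):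
--     # Recursive DFS flood fill (nested helper + nonlocal accumulators) instead
--     # of A's FIFO Queue BFS; mutates visitboard in place exactly like A.
--     n = len(board)
--     points = 1
--     saw_x = saw_o = False
--
--     def rec(cx, cy):
--         nonlocal points, saw_x, saw_o
--         for nx, ny in ((cx + 1, cy), (cx - 1, cy), (cx, cy + 1), (cx, cy - 1)):
--             if 0 <= nx < n and 0 <= ny < n and not visitboard[nx][ny]:
--                 cell = board[nx][ny]
--                 if cell == ' ':
--                     visitboard[nx][ny] = True
--                     points += 1
--                     rec(nx, ny)
--                 elif cell == 'X':
--                     saw_x = True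
--                 elif cell == 'O':
--                     saw_o = True
--
--     rec(x, y)
--     if saw_x and not saw_o:
--         who = 'X'
--     elif saw_o and not saw_x:
--         who = 'O'
--     else:
--         who = ' '
--     return visitboard, points, who
-- ===== Notes on version B (the rewrite author's own statement) =====
-- stated objective: idiomatic
-- what changed: Replaces the FIFO queue.Queue BFS loop with a recursive DFS flood fill (nested helper recursing into each fresh ' ' neighbour, two boolean border flags instead of a set); Pre_ excludes ragged shapes (a visitboard/board row shorter than len(board)) on which the flood's indexing can raise IndexError, except one-iteration runs it can admit.
import Mathlib
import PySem

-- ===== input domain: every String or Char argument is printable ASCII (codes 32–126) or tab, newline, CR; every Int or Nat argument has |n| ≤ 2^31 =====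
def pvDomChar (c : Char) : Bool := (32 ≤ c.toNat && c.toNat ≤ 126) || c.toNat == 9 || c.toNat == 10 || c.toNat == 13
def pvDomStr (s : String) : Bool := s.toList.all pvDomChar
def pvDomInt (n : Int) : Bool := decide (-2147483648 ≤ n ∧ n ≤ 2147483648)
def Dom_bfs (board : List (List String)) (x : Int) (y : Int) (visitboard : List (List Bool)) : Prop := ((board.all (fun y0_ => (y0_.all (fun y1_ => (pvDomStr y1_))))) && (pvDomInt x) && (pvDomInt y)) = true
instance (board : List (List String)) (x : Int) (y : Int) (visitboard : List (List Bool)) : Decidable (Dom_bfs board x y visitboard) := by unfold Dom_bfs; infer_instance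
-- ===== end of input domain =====

-- B replaces A's FIFO queue.Queue BFS (with a bordering-colour set) by a recursive DFS flood
-- fill (a nested helper recursing into each freshly discovered ' ' neighbour) with two boolean
-- border flags; both mutate visitboard identically (the proved equivalence is about the returned
-- triple, whose first component is that same final visitboard content).

-- ===== PORT A =====

-- x>=len(board) or y>=len(board) or x<0 or y<0
def oobA (board : List (List String)) (x y : Int) : Bool :=
  decide ((board.length : Int) ≤ x) || decide ((board.length : Int) ≤ y) ||
    decide (x < 0) || decide (y < 0)

-- visitboard[i][j] read as an Option (some b = the entry exists); port A tests
-- 'entryAt v i j = some false' where Python tests 'visitboard[i][j] == False' — the extra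
-- existence check only totalizes the recursion; under Pre_bfs the entry always exists.
def entryAt (v : List (List Bool)) (i j : Int) : Option Bool :=
  (PySem.List.pyGet? v i).bind fun r => PySem.List.pyGet? r j

-- board[i][j]; only read under the bounds guard, where pyGet? is exact (the "" default is unreachable under Pre_bfs)
def cellAt (b : List (List String)) (i j : Int) : String :=
  ((PySem.List.pyGet? b i).bind fun r => PySem.List.pyGet? r j).getD ""

-- visitboard[i][j] = True (in-place in Python; functional update here)
def setTrue (v : List (List Bool)) (i j : Int) : List (List Bool) :=
  PySem.List.pySetD v i (PySem.List.pySetD (PySem.List.pyGetD v i []) j true)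

-- number of False entries; termination measure component for both ports
def fc (v : List (List Bool)) : Nat := (v.map fun r => r.count false).sum

def dirsA : List (Int × Int) := [(1, 0), (-1, 0), (0, 1), (0, -1)]

-- body of A's inner 'for dx, dy in directions' loop; state = (queue, visitboard, points, bordering_players)
def stepA (board : List (List String)) (cx cy : Int)
    (s : List (Int × Int) × List (List Bool) × Int × PySem.Set String) (d : Int × Int) :
    List (Int × Int) × List (List Bool) × Int × PySem.Set String :=
  if oobA board (cx + d.1) (cy + d.2) = false ∧
      entryAt s.2.1 (cx + d.1) (cy + d.2) = some false then
    if cellAt board (cx + d.1) (cy + d.2) = " " then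
      (s.1 ++ [(cx + d.1, cy + d.2)], setTrue s.2.1 (cx + d.1) (cy + d.2), s.2.2.1 + 1, s.2.2.2)
    else if cellAt board (cx + d.1) (cy + d.2) = "X" then
      (s.1, s.2.1, s.2.2.1, PySem.Set.add s.2.2.2 "X")
    else if cellAt board (cx + d.1) (cy + d.2) = "O" then
      (s.1, s.2.1, s.2.2.1, PySem.Set.add s.2.2.2 "O")
    else s
  else s

lemma oob_false (board : List (List String)) (x y : Int) (h : oobA board x y = false) :
    0 ≤ x ∧ x < (board.length : Int) ∧ 0 ≤ y ∧ y < (board.length : Int) := by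
  simp [oobA] at h
  omega

lemma sum_map_set {α : Type} (f : α → Nat) (v : List α) (i : Nat) (r : α) (h : i < v.length) :
    ((v.set i r).map f).sum + f v[i] = (v.map f).sum + f r := by
  induction v generalizing i with
  | nil => simp at h
  | cons a v ih =>
    cases i with
    | zero => simp [List.set]; omega
    | succ i =>
      simp only [List.set, List.map, List.sum_cons, List.getElem_cons_succ]
      have := ih i (by simpa using h)
      omega

lemma count_set_true (r : List Bool) (j : Nat) (h : j < r.length) (hf : r[j] = false) :
    (r.set j true).count false + 1 = r.count false := by
  induction r generalizing j with
  | nil => simp at h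
  | cons a r ih =>
    cases j with
    | zero => simp_all [List.count_cons]
    | succ j =>
      simp only [List.set, List.count_cons]
      have := ih j (by simpa using h) (by simpa using hf)
      omega

lemma fc_setTrue (v : List (List Bool)) (i j : Int) (hi : 0 ≤ i) (hj : 0 ≤ j)
    (h : entryAt v i j = some false) : fc (setTrue v i j) + 1 = fc v := by
  rcases Option.bind_eq_some_iff.1 h with ⟨r, hr, hrj⟩
  rw [PySem.List.pyGet?_of_nonneg v hi] at hr
  rw [PySem.List.pyGet?_of_nonneg r hj] at hrj
  have hilen : i.toNat < v.length := (List.getElem?_eq_some_iff.1 hr).1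
  have hjlen : j.toNat < r.length := (List.getElem?_eq_some_iff.1 hrj).1
  have hvr : v[i.toNat] = r := (List.getElem?_eq_some_iff.1 hr).2
  have hrf : r[j.toNat] = false := (List.getElem?_eq_some_iff.1 hrj).2
  have hset : setTrue v i j = v.set i.toNat (r.set j.toNat true) := by
    rw [setTrue, PySem.List.pyGetD_of_nonneg v [] hi,
      PySem.List.pySetD_of_nonneg _ _ hj, PySem.List.pySetD_of_nonneg _ _ hi]
    rw [List.getD, hr]
    rfl
  have h1 := sum_map_set (fun r => r.count false) v i.toNat (r.set j.toNat true) hilen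
  have h2 := count_set_true r j.toNat hjlen hrf
  simp only [hvr] at h1
  simp only [fc, hset]
  omega

lemma stepA_meas (board : List (List String)) (cx cy : Int)
    (s : List (Int × Int) × List (List Bool) × Int × PySem.Set String) (d : Int × Int) :
    2 * fc (stepA board cx cy s d).2.1 + (stepA board cx cy s d).1.length ≤
      2 * fc s.2.1 + s.1.length := by
  unfold stepA
  split_ifs with h1 h2 h3 h4
  · obtain ⟨hnx, _, hny, _⟩ := oob_false _ _ _ h1.1
    have := fc_setTrue s.2.1 _ _ hnx hny h1.2
    simp only [List.length_append, List.length_cons, List.length_nil]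
    omega
  all_goals simp

lemma foldl_meas_le {α σ : Type} (m : σ → Nat) (f : σ → α → σ)
    (hstep : ∀ s a, m (f s a) ≤ m s) : ∀ (l : List α) (s : σ), m (l.foldl f s) ≤ m s := by
  intro l
  induction l with
  | nil => simp
  | cons a l ih => intro s; exact le_trans (ih (f s a)) (hstep s a)

lemma foldA_meas (board : List (List String)) (cx cy : Int)
    (s : List (Int × Int) × List (List Bool) × Int × PySem.Set String) :
    2 * fc (dirsA.foldl (stepA board cx cy) s).2.1 + (dirsA.foldl (stepA board cx cy) s).1.length ≤
      2 * fc s.2.1 + s.1.length :=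
  foldl_meas_le (fun s => 2 * fc s.2.1 + s.1.length) _ (stepA_meas board cx cy) dirsA s

-- A's 'while not queue.empty()' loop (FIFO: pop from the front, put at the back)
def loopA (board : List (List String)) :
    List (Int × Int) → List (List Bool) → Int → PySem.Set String →
    List (List Bool) × Int × PySem.Set String
  | [], v, pts, bp => (v, pts, bp)
  | (cx, cy) :: rest, v, pts, bp =>
    let s := dirsA.foldl (stepA board cx cy) (rest, v, pts, bp)
    loopA board s.1 s.2.1 s.2.2.1 s.2.2.2
termination_by q v _ _ => 2 * fc v + q.length
decreasing_by
  have := foldA_meas board cx cy (rest, v, pts, bp)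
  simp at this ⊢
  omega

def bfs (board : List (List String)) (x : Int) (y : Int) (visitboard : List (List Bool)) :
    List (List Bool) × Int × String :=
  let r := loopA board [(x, y)] visitboard 1 PySem.Set.empty
  -- bordering_players.pop() on a one-element set is its unique element (deterministic)
  (r.1, r.2.1, if PySem.Set.len r.2.2 = 1 then r.2.2.headD " " else " ")

-- ===== PORT B =====

-- the four neighbour cells ((cx+1,cy), (cx-1,cy), (cx,cy+1), (cx,cy-1))
def nbrsB (cx cy : Int) : List (Int × Int) := [(cx + 1, cy), (cx - 1, cy), (cx, cy + 1), (cx, cy - 1)]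

-- 'visitboard[nx][ny]' under B's own 0 ≤ nx < n bound guard; the 'true' default is only
-- reached on ragged shapes outside Pre_bfs (where Python raises IndexError)
def vget (v : List (List Bool)) (i j : Int) : Bool :=
  (v.getD i.toNat []).getD j.toNat true

-- 'board[nx][ny]'; the "" default likewise only on shapes outside Pre_bfs
def bget (b : List (List String)) (i j : Int) : String :=
  (b.getD i.toNat []).getD j.toNat ""

-- 'visitboard[nx][ny] = True'
def vmark (v : List (List Bool)) (i j : Int) : List (List Bool) :=
  v.set i.toNat ((v.getD i.toNat []).set j.toNat true)

lemma nbrsB_len (cx cy : Int) : (nbrsB cx cy).length = 4 := rfl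

-- termination helpers for go: count of False entries over the flattened visitboard,
-- decreased by exactly one whenever vmark marks a cell vget reads as unvisited
def unvis (v : List (List Bool)) : Nat := v.flatten.count false

lemma unvis_row (r : List Bool) : ∀ b : Nat, r.getD b true = false →
    (r.set b true).count false + 1 = r.count false := by
  induction r with
  | nil => intro b h; simp [List.getD] at h
  | cons x t ih =>
    intro b h
    cases b with
    | zero =>
      rw [List.getD_cons_zero] at h
      subst h
      simp [List.count_cons]
    | succ b =>
      rw [List.getD_cons_succ] at h
      simp only [List.set_cons_succ, List.count_cons]
      have := ih b h
      omega

lemma unvis_mark (v : List (List Bool)) (i j : Int) (h : vget v i j = false) :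
    unvis (vmark v i j) + 1 = unvis v := by
  unfold vget at h
  unfold unvis vmark
  generalize i.toNat = a at *
  generalize j.toNat = b at *
  induction v generalizing a with
  | nil => simp [List.getD] at h
  | cons r t ih =>
    cases a with
    | zero =>
      rw [List.getD_cons_zero] at h ⊢
      simp only [List.set_cons_zero, List.flatten_cons, List.count_append]
      have := unvis_row r b h
      omega
    | succ a =>
      rw [List.getD_cons_succ] at h ⊢
      simp only [List.set_cons_succ, List.flatten_cons, List.count_append]
      have := ih a h
      omega

-- B's recursive flood: 'go cands st' is the remaining iterations of rec's neighbour for-loop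
-- (cands = neighbours still to look at); the nested call on 'nbrsB nx ny' is rec(nx, ny).
-- The subtype result carries the bound 'marking never adds False entries', needed only for
-- termination of the nested recursion; state = (visitboard, points, saw_x, saw_o).
def go (board : List (List String)) (n : Int) :
    List (Int × Int) → (st : List (List Bool) × Int × Bool × Bool) →
      {r : List (List Bool) × Int × Bool × Bool // unvis r.1 ≤ unvis st.1}
  | [], st => ⟨st, le_rfl⟩
  | (nx, ny) :: rest, st =>
    if h : (0 ≤ nx ∧ nx < n ∧ 0 ≤ ny ∧ ny < n) ∧ vget st.1 nx ny = false then
      if bget board nx ny = " " then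
        match go board n (nbrsB nx ny) (vmark st.1 nx ny, st.2.1 + 1, st.2.2) with
        | ⟨mid, hmid⟩ =>
          match go board n rest mid with
          | ⟨fin, hfin⟩ =>
            ⟨fin, by
              have hmid' : unvis mid.1 ≤ unvis (vmark st.1 nx ny) := hmid
              have hfin' : unvis fin.1 ≤ unvis mid.1 := hfin
              have hk := unvis_mark st.1 nx ny h.2
              omega⟩
      else if bget board nx ny = "X" then
        match go board n rest (st.1, st.2.1, true, st.2.2.2) with
        | ⟨fin, hfin⟩ => ⟨fin, hfin⟩
      else if bget board nx ny = "O" then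
        match go board n rest (st.1, st.2.1, st.2.2.1, true) with
        | ⟨fin, hfin⟩ => ⟨fin, hfin⟩
      else
        match go board n rest st with
        | ⟨fin, hfin⟩ => ⟨fin, hfin⟩
    else
      match go board n rest st with
      | ⟨fin, hfin⟩ => ⟨fin, hfin⟩
termination_by cands st => 5 * unvis st.1 + cands.length
decreasing_by
  all_goals simp only [nbrsB_len, List.length_cons, List.length_nil]
  all_goals first
    | omega
    | (have hmid' : unvis mid.1 ≤ unvis (vmark st.1 nx ny) := hmid
       have hk := unvis_mark st.1 nx ny h.2
       omega)
    | (have hk := unvis_mark st.1 nx ny h.2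
       omega)

def bfs_alt (board : List (List String)) (x : Int) (y : Int) (visitboard : List (List Bool)) :
    List (List Bool) × Int × String :=
  let s := (go board (board.length : Int) (nbrsB x y) (visitboard, 1, false, false)).val
  (s.1, s.2.1,
    if s.2.2.1 && !s.2.2.2 then "X" else if s.2.2.2 && !s.2.2.1 then "O" else " ")

-- ===== PRECONDITION & SPEC =====
-- Pre_bfs excludes shapes on which the Python indexing can raise IndexError (bounds are checked
-- against len(board) only): it admits inputs whose visitboard/board rows are all long enough,
-- and also inputs whose start cell has no in-bounds neighbour that is unvisited and ' '
-- (there the flood stops after the start and only touches the four neighbour entries it requires).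
def Pre_bfs (board : List (List String)) (x : Int) (y : Int) (visitboard : List (List Bool)) : Prop :=
  (board.length ≤ visitboard.length ∧ (∀ r ∈ board, board.length ≤ r.length) ∧
    (∀ r ∈ visitboard, board.length ≤ r.length)) ∨
  (∀ p ∈ nbrsB x y, oobA board p.1 p.2 = false →
    entryAt visitboard p.1 p.2 = some true ∨
      (entryAt visitboard p.1 p.2 = some false ∧
        (((PySem.List.pyGet? board p.1).bind fun r => PySem.List.pyGet? r p.2)).isSome ∧
        cellAt board p.1 p.2 ≠ " "))
instance (board : List (List String)) (x : Int) (y : Int) (visitboard : List (List Bool)) : Decidable (Pre_bfs board x y visitboard) := by unfold Pre_bfs; infer_instance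

def pvWitness_bfs : List (List String) × Int × Int × List (List Bool) :=
  ([[" ", "X"], [" ", "O"]], 0, 0, [[false, false], [false, false]])

def Spec_bfs (board : List (List String)) (x : Int) (y : Int) (visitboard : List (List Bool)) (out : List (List Bool) × Int × String) : Prop := out = bfs_alt board x y visitboard
instance (board : List (List String)) (x : Int) (y : Int) (visitboard : List (List Bool)) (out : List (List Bool) × Int × String) : Decidable (Spec_bfs board x y visitboard out) := by unfold Spec_bfs; infer_instance

-- ===== CLAIM (what is proved, stated in full; the proofs are below) =====
def Claim_equal_bfs : Prop := ∀ (board : List (List String)) (x : Int) (y : Int) (visitboard : List (List Bool)), Dom_bfs board x y visitboard → Pre_bfs board x y visitboard → Spec_bfs board x y visitboard (bfs board x y visitboard)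

-- ===== LEMMAS AND PROOFS =====

-- A's inner loop, generically over the bordering accumulator (instantiated with the PySem.Set).
def gstep {β : Type} (board : List (List String)) (aX aO : β → β)
    (s : List (Int × Int) × List (List Bool) × Int × β) (p : Int × Int) :
    List (Int × Int) × List (List Bool) × Int × β :=
  if oobA board p.1 p.2 = false ∧ entryAt s.2.1 p.1 p.2 = some false then
    if cellAt board p.1 p.2 = " " then
      (s.1 ++ [p], setTrue s.2.1 p.1 p.2, s.2.2.1 + 1, s.2.2.2)
    else if cellAt board p.1 p.2 = "X" then (s.1, s.2.1, s.2.2.1, aX s.2.2.2)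
    else if cellAt board p.1 p.2 = "O" then (s.1, s.2.1, s.2.2.1, aO s.2.2.2)
    else s
  else s

-- cell p is in bounds, unvisited in v, and carries cell value c
def bcond (board : List (List String)) (v : List (List Bool)) (p : Int × Int) (c : String) : Bool :=
  !oobA board p.1 p.2 && (entryAt v p.1 p.2 == some false) && (cellAt board p.1 p.2 == c)

def freeB (board : List (List String)) (v : List (List Bool)) (p : Int × Int) : Bool :=
  bcond board v p " "

def news (board : List (List String)) (v : List (List Bool)) (ns : List (Int × Int)) :
    List (Int × Int) := ns.filter (freeB board v)

def markAll (v : List (List Bool)) (ps : List (Int × Int)) : List (List Bool) :=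
  ps.foldl (fun w p => setTrue w p.1 p.2) v

def bfold {β : Type} (board : List (List String)) (v : List (List Bool)) (aX aO : β → β)
    (b : β) (ns : List (Int × Int)) : β :=
  ns.foldl
    (fun acc p =>
      if bcond board v p "X" = true then aX acc
      else if bcond board v p "O" = true then aO acc else acc) b

-- cells flooded starting from the pending list P over baseline visitboard v
inductive Cl (board : List (List String)) (v : List (List Bool)) (P : List (Int × Int)) :
    Int × Int → Prop
  | src (p q) : p ∈ P → q ∈ nbrsB p.1 p.2 → freeB board v q = true → Cl board v P q
  | step (p q) : Cl board v P p → q ∈ nbrsB p.1 p.2 → freeB board v q = true → Cl board v P q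

-- some pending-or-flooded cell has an unvisited neighbour carrying cell value c
def BorderP (board : List (List String)) (v : List (List Bool)) (P : List (Int × Int))
    (c : String) : Prop :=
  ∃ p, (p ∈ P ∨ Cl board v P p) ∧ ∃ t ∈ nbrsB p.1 p.2, bcond board v t c = true

lemma oobA_eq_false_iff (board : List (List String)) (x y : Int) :
    oobA board x y = false ↔ 0 ≤ x ∧ x < (board.length : Int) ∧ 0 ≤ y ∧ y < (board.length : Int) := by
  simp [oobA]
  omega

lemma stepA_eq_gstep (board : List (List String)) (cx cy : Int)
    (s : List (Int × Int) × List (List Bool) × Int × PySem.Set String) (d : Int × Int) :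
    stepA board cx cy s d =
      gstep board (fun b => PySem.Set.add b "X") (fun b => PySem.Set.add b "O") s
        (cx + d.1, cy + d.2) := rfl

lemma foldA_eq_gstep (board : List (List String)) (cx cy : Int)
    (s : List (Int × Int) × List (List Bool) × Int × PySem.Set String) :
    dirsA.foldl (stepA board cx cy) s =
      (nbrsB cx cy).foldl
        (gstep board (fun b => PySem.Set.add b "X") (fun b => PySem.Set.add b "O")) s := by
  simp only [dirsA, nbrsB, List.foldl, stepA_eq_gstep]
  rw [show cx + -1 = cx - 1 from by ring, show cy + -1 = cy - 1 from by ring,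
    show cy + 0 = cy from by ring, show cx + 0 = cx from by ring]

lemma entry_getElem (v : List (List Bool)) (i j : Nat) (hi : i < v.length)
    (hj : j < v[i].length) : entryAt v (i : Int) (j : Int) = some v[i][j] := by
  simp [entryAt, PySem.List.pyGet?_natCast, List.getElem?_eq_getElem, hi, hj]

lemma entry_setTrue_self (v : List (List Bool)) (i j : Int) (hi : 0 ≤ i) (hj : 0 ≤ j)
    (h : entryAt v i j = some false) : entryAt (setTrue v i j) i j = some true := by
  rcases Option.bind_eq_some_iff.1 h with ⟨r, hr, hrj⟩
  rw [PySem.List.pyGet?_of_nonneg v hi] at hr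
  rw [PySem.List.pyGet?_of_nonneg r hj] at hrj
  have hilen : i.toNat < v.length := (List.getElem?_eq_some_iff.1 hr).1
  have hjlen : j.toNat < r.length := (List.getElem?_eq_some_iff.1 hrj).1
  have hset : setTrue v i j = v.set i.toNat (r.set j.toNat true) := by
    rw [setTrue, PySem.List.pyGetD_of_nonneg v [] hi,
      PySem.List.pySetD_of_nonneg _ _ hj, PySem.List.pySetD_of_nonneg _ _ hi]
    rw [List.getD, hr]
    rfl
  rw [hset, entryAt, PySem.List.pyGet?_of_nonneg _ hi, List.getElem?_set_self hilen]
  simp [PySem.List.pyGet?_of_nonneg _ hj, List.getElem?_set_self hjlen]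

lemma entry_setTrue_ne (v : List (List Bool)) (i j a b : Int) (hi : 0 ≤ i) (hj : 0 ≤ j)
    (ha : 0 ≤ a) (hb : 0 ≤ b) (h : (entryAt v i j).isSome) (hne : (a, b) ≠ (i, j)) :
    entryAt (setTrue v i j) a b = entryAt v a b := by
  rcases Option.isSome_iff_exists.1 h with ⟨w, hw⟩
  rcases Option.bind_eq_some_iff.1 hw with ⟨r, hr, hrj⟩
  rw [PySem.List.pyGet?_of_nonneg v hi] at hr
  have hset : setTrue v i j = v.set i.toNat (r.set j.toNat true) := by
    rw [setTrue, PySem.List.pyGetD_of_nonneg v [] hi,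
      PySem.List.pySetD_of_nonneg _ _ hj, PySem.List.pySetD_of_nonneg _ _ hi]
    rw [List.getD, hr]
    rfl
  have hvr : v[i.toNat]? = some r := hr
  rw [hset, entryAt, entryAt, PySem.List.pyGet?_of_nonneg _ ha, PySem.List.pyGet?_of_nonneg _ ha]
  by_cases hai : a = i
  · subst hai
    have hbj : b ≠ j := by
      intro hbj
      exact hne (by rw [hbj])
    rw [List.getElem?_set_self ((List.getElem?_eq_some_iff.1 hr).1), hvr]
    simp only [Option.bind_some]
    rw [PySem.List.pyGet?_of_nonneg _ hb, PySem.List.pyGet?_of_nonneg _ hb]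
    exact List.getElem?_set_ne (by omega)
  · rw [List.getElem?_set_ne (by omega)]

lemma maplen_setTrue (v : List (List Bool)) (i j : Int) (hi : 0 ≤ i) (hj : 0 ≤ j) :
    (setTrue v i j).map List.length = v.map List.length := by
  rw [setTrue, PySem.List.pySetD_of_nonneg _ _ hi]
  by_cases hlen : i.toNat < v.length
  · have h2 : (PySem.List.pySetD (PySem.List.pyGetD v i []) j true).length =
        v[i.toNat].length := by
      simp [PySem.List.length_pySetD, PySem.List.pyGetD_of_nonneg v [] hi,
        List.getElem?_eq_getElem hlen]
    rw [List.map_set, h2, ← List.getElem_map (List.length) (h := by simpa using hlen)]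
    exact List.set_getElem_self (by simpa using hlen)
  · rw [List.set_eq_of_length_le (by omega)]

lemma bcond_setTrue_ne (board : List (List String)) (v : List (List Bool)) (i j : Int)
    (p : Int × Int) (c : String) (hi : 0 ≤ i) (hj : 0 ≤ j) (h : (entryAt v i j).isSome)
    (hne : p ≠ (i, j)) : bcond board (setTrue v i j) p c = bcond board v p c := by
  by_cases hoob : oobA board p.1 p.2 = false
  · obtain ⟨ha, _, hb, _⟩ := oob_false _ _ _ hoob
    unfold bcond
    rw [entry_setTrue_ne v i j p.1 p.2 hi hj ha hb h (by simpa using hne)]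
  · simp only [Bool.not_eq_false] at hoob
    simp [bcond, hoob]

lemma freeB_elim (board : List (List String)) (v : List (List Bool)) (p : Int × Int)
    (h : freeB board v p = true) :
    0 ≤ p.1 ∧ 0 ≤ p.2 ∧ entryAt v p.1 p.2 = some false ∧ cellAt board p.1 p.2 = " " ∧
      oobA board p.1 p.2 = false := by
  have h' := h
  unfold freeB bcond at h'
  simp only [Bool.and_eq_true, Bool.not_eq_true', beq_iff_eq] at h'
  obtain ⟨⟨hoob, hent⟩, hcell⟩ := h'
  obtain ⟨h1, _, h2, _⟩ := oob_false _ _ _ hoob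
  exact ⟨h1, h2, hent, hcell, hoob⟩

-- everything marking a nodup list of fresh cells does to the visitboard
lemma markAll_char (board : List (List String)) (v : List (List Bool)) (ps : List (Int × Int))
    (hnd : ps.Nodup) (hfree : ∀ p ∈ ps, freeB board v p = true) :
    (markAll v ps).map List.length = v.map List.length ∧
    fc (markAll v ps) + ps.length = fc v ∧
    (∀ p ∈ ps, entryAt (markAll v ps) p.1 p.2 = some true) ∧
    (∀ a b : Int, 0 ≤ a → 0 ≤ b → (a, b) ∉ ps →
      entryAt (markAll v ps) a b = entryAt v a b) := by
  induction ps generalizing v with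
  | nil => simp [markAll]
  | cons p t ih =>
    obtain ⟨hp1, hp2, hent, hcell, hoob⟩ := freeB_elim board v p (hfree p List.mem_cons_self)
    have hpt : p ∉ t := (List.nodup_cons.1 hnd).1
    have hstep : markAll v (p :: t) = markAll (setTrue v p.1 p.2) t := rfl
    have hfree' : ∀ r ∈ t, freeB board (setTrue v p.1 p.2) r = true := by
      intro r hr
      rw [freeB, bcond_setTrue_ne board v p.1 p.2 r " " hp1 hp2 (by simp [hent])
        (by rintro rfl; exact hpt hr)]
      exact hfree r (List.mem_cons_of_mem _ hr)
    obtain ⟨ih1, ih2, ih3, ih4⟩ := ih (setTrue v p.1 p.2) (List.nodup_cons.1 hnd).2 hfree'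
    refine ⟨?_, ?_, ?_, ?_⟩
    · rw [hstep, ih1, maplen_setTrue v p.1 p.2 hp1 hp2]
    · have := fc_setTrue v p.1 p.2 hp1 hp2 hent
      rw [hstep]
      simp only [List.length_cons]
      omega
    · intro r hr
      rcases List.mem_cons.1 hr with rfl | hr
      · rw [hstep, ih4 r.1 r.2 hp1 hp2 (by simpa using hpt)]
        exact entry_setTrue_self v r.1 r.2 hp1 hp2 hent
      · exact hstep ▸ ih3 r hr
    · intro a b ha hb hab
      rw [hstep, ih4 a b ha hb (fun h => hab (List.mem_cons_of_mem _ h))]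
      exact entry_setTrue_ne v p.1 p.2 a b hp1 hp2 ha hb (by simp [hent])
        (by rintro h; exact hab (by rw [h]; exact List.mem_cons_self))

lemma freeB_markAll (board : List (List String)) (v : List (List Bool)) (ps : List (Int × Int))
    (hnd : ps.Nodup) (hfree : ∀ p ∈ ps, freeB board v p = true) (p : Int × Int) :
    freeB board (markAll v ps) p = (freeB board v p && !(decide (p ∈ ps))) := by
  obtain ⟨hml, hfc, hmem, hnot⟩ := markAll_char board v ps hnd hfree
  by_cases hoob : oobA board p.1 p.2 = false
  · obtain ⟨ha, _, hb, _⟩ := oob_false _ _ _ hoob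
    by_cases hp : p ∈ ps
    · have := hmem p hp
      simp [freeB, bcond, this, hp]
    · rw [freeB, bcond, hnot p.1 p.2 ha hb hp]
      simp [freeB, bcond, hp]
  · simp only [Bool.not_eq_false] at hoob
    simp [freeB, bcond, hoob]

lemma bcond_markAll (board : List (List String)) (v : List (List Bool)) (ps : List (Int × Int))
    (hnd : ps.Nodup) (hfree : ∀ p ∈ ps, freeB board v p = true) (p : Int × Int) (c : String)
    (hc : c ≠ " ") : bcond board (markAll v ps) p c = bcond board v p c := by
  obtain ⟨hml, hfc, hmem, hnot⟩ := markAll_char board v ps hnd hfree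
  by_cases hoob : oobA board p.1 p.2 = false
  · obtain ⟨ha, _, hb, _⟩ := oob_false _ _ _ hoob
    by_cases hp : p ∈ ps
    · obtain ⟨_, _, hent, hcell, _⟩ := freeB_elim board v p (hfree p hp)
      have hc2 : (cellAt board p.1 p.2 == c) = false := by
        simp [hcell]
        exact fun h => hc h.symm
      simp [bcond, hc2]
    · rw [bcond, bcond, hnot p.1 p.2 ha hb hp]
  · simp only [Bool.not_eq_false] at hoob
    simp [bcond, hoob]

lemma nbrs_nodup (cx cy : Int) : (nbrsB cx cy).Nodup := by
  simp [nbrsB, Prod.ext_iff]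
  omega

lemma news_nodup (board : List (List String)) (v : List (List Bool)) (cx cy : Int) :
    (news board v (nbrsB cx cy)).Nodup := (nbrs_nodup cx cy).filter _

lemma news_free (board : List (List String)) (v : List (List Bool)) (ns : List (Int × Int)) :
    ∀ p ∈ news board v ns, freeB board v p = true := by
  intro p hp
  exact (List.mem_filter.1 hp).2

lemma bcond_true_iff (board : List (List String)) (v : List (List Bool)) (p : Int × Int)
    (c : String) :
    bcond board v p c = true ↔
      (oobA board p.1 p.2 = false ∧ entryAt v p.1 p.2 = some false) ∧
        cellAt board p.1 p.2 = c := by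
  simp [bcond, and_assoc]

-- the inner for-loop, characterised: it enqueues and marks exactly the fresh neighbours and
-- applies aX/aO according to the bordering conditions, all read off the pre-state
lemma gfold_char {β : Type} (board : List (List String)) (aX aO : β → β)
    (ns : List (Int × Int)) (hnd : ns.Nodup) (q : List (Int × Int)) (v : List (List Bool))
    (pts : Int) (b : β) :
    ns.foldl (gstep board aX aO) (q, v, pts, b) =
      (q ++ news board v ns, markAll v (news board v ns),
        pts + (news board v ns).length, bfold board v aX aO b ns) := by
  induction ns generalizing v q pts b with
  | nil => simp [news, markAll, bfold]
  | cons p t ih =>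
    have hpt : p ∉ t := (List.nodup_cons.1 hnd).1
    have hndt : t.Nodup := (List.nodup_cons.1 hnd).2
    rw [List.foldl_cons]
    by_cases hfp : freeB board v p = true
    · obtain ⟨hp1, hp2, hent, hcell, hoob⟩ := freeB_elim board v p hfp
      have hg : gstep board aX aO (q, v, pts, b) p =
          (q ++ [p], setTrue v p.1 p.2, pts + 1, b) := by
        simp [gstep, hoob, hent, hcell]
      have hsame : ∀ r ∈ t, ∀ c', bcond board (setTrue v p.1 p.2) r c' = bcond board v r c' := by
        intro r hr c'
        exact bcond_setTrue_ne board v p.1 p.2 r c' hp1 hp2 (by simp [hent])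
          (by rintro rfl; exact hpt hr)
      have hnews : news board (setTrue v p.1 p.2) t = news board v t :=
        List.filter_congr (fun r hr => hsame r hr " ")
      have hnewscons : news board v (p :: t) = p :: news board v t := by
        simp [news, List.filter_cons, hfp]
      rw [hg, ih hndt (q ++ [p]) (setTrue v p.1 p.2) (pts + 1) b, hnews]
      have hbf : bfold board (setTrue v p.1 p.2) aX aO b t = bfold board v aX aO b t := by
        unfold bfold
        exact PySem.List.foldl_congr_mem t _ _ b
          (fun acc r hr => by rw [hsame r hr "X", hsame r hr "O"])
      have hbcX : bcond board v p "X" = false := by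
        rw [Bool.eq_false_iff]
        intro h
        have := ((bcond_true_iff board v p "X").1 h).2
        rw [hcell] at this
        exact absurd this (by decide)
      have hbcO : bcond board v p "O" = false := by
        rw [Bool.eq_false_iff]
        intro h
        have := ((bcond_true_iff board v p "O").1 h).2
        rw [hcell] at this
        exact absurd this (by decide)
      rw [hbf, hnewscons]
      refine Prod.ext ?_ (Prod.ext ?_ (Prod.ext ?_ ?_))
      · simp
      · simp [markAll]
      · simp only [List.length_cons]
        push_cast
        ring
      · simp [bfold, List.foldl_cons, hbcX, hbcO]
    · have hnews : news board v (p :: t) = news board v t := by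
        simp [news, List.filter_cons, hfp]
      by_cases hguard : oobA board p.1 p.2 = false ∧ entryAt v p.1 p.2 = some false
      · by_cases hX : cellAt board p.1 p.2 = "X"
        · have hg : gstep board aX aO (q, v, pts, b) p = (q, v, pts, aX b) := by
            have hns : cellAt board p.1 p.2 ≠ " " := by
              intro h
              exact hfp ((bcond_true_iff board v p " ").2 ⟨hguard, h⟩)
            simp [gstep, hguard, hX, hns]
          have hbcX : bcond board v p "X" = true := (bcond_true_iff board v p "X").2 ⟨hguard, hX⟩
          rw [hg, ih hndt q v pts (aX b), hnews]
          simp [bfold, List.foldl_cons, hbcX]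
        · by_cases hO : cellAt board p.1 p.2 = "O"
          · have hg : gstep board aX aO (q, v, pts, b) p = (q, v, pts, aO b) := by
              have hns : cellAt board p.1 p.2 ≠ " " := by
                intro h
                exact hfp ((bcond_true_iff board v p " ").2 ⟨hguard, h⟩)
              simp [gstep, hguard, hX, hO, hns]
            have hbcX : bcond board v p "X" = false := by
              rw [Bool.eq_false_iff]
              exact fun h => hX ((bcond_true_iff board v p "X").1 h).2
            have hbcO : bcond board v p "O" = true := (bcond_true_iff board v p "O").2 ⟨hguard, hO⟩
            rw [hg, ih hndt q v pts (aO b), hnews]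
            simp [bfold, List.foldl_cons, hbcX, hbcO]
          · have hg : gstep board aX aO (q, v, pts, b) p = (q, v, pts, b) := by
              have hns : cellAt board p.1 p.2 ≠ " " := by
                intro h
                exact hfp ((bcond_true_iff board v p " ").2 ⟨hguard, h⟩)
              simp [gstep, hguard, hX, hO, hns]
            have hbcX : bcond board v p "X" = false := by
              rw [Bool.eq_false_iff]
              exact fun h => hX ((bcond_true_iff board v p "X").1 h).2
            have hbcO : bcond board v p "O" = false := by
              rw [Bool.eq_false_iff]
              exact fun h => hO ((bcond_true_iff board v p "O").1 h).2
            rw [hg, ih hndt q v pts b, hnews]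
            simp [bfold, List.foldl_cons, hbcX, hbcO]
      · have hg : gstep board aX aO (q, v, pts, b) p = (q, v, pts, b) := by
          simp only [gstep]
          rw [if_neg hguard]
        have hbcX : bcond board v p "X" = false := by
          rw [Bool.eq_false_iff]
          exact fun h => hguard ((bcond_true_iff board v p "X").1 h).1
        have hbcO : bcond board v p "O" = false := by
          rw [Bool.eq_false_iff]
          exact fun h => hguard ((bcond_true_iff board v p "O").1 h).1
        rw [hg, ih hndt q v pts b, hnews]
        simp [bfold, List.foldl_cons, hbcX, hbcO]

lemma Cl_nil (board : List (List String)) (v : List (List Bool)) (z : Int × Int) :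
    ¬ Cl board v [] z := by
  intro h
  induction h with
  | src p q hp => simp at hp
  | step p q hc hq hf ih => exact ih

-- the crux for A: one queue-expansion step preserves the flooded region
lemma Cl_step (board : List (List String)) (v : List (List Bool)) (c : Int × Int)
    (P : List (Int × Int)) (z : Int × Int) :
    Cl board v (c :: P) z ↔
      z ∈ news board v (nbrsB c.1 c.2) ∨
        Cl board (markAll v (news board v (nbrsB c.1 c.2)))
          (P ++ news board v (nbrsB c.1 c.2)) z := by
  have hnd : (news board v (nbrsB c.1 c.2)).Nodup := news_nodup board v c.1 c.2
  have hfree : ∀ p ∈ news board v (nbrsB c.1 c.2), freeB board v p = true :=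
    news_free board v (nbrsB c.1 c.2)
  have f1 : ∀ w : Int × Int,
      freeB board (markAll v (news board v (nbrsB c.1 c.2))) w = true ↔
        freeB board v w = true ∧ w ∉ news board v (nbrsB c.1 c.2) := by
    intro w
    rw [freeB_markAll board v _ hnd hfree w]
    simp
  have f2 : ∀ w : Int × Int, w ∈ news board v (nbrsB c.1 c.2) ↔
      w ∈ nbrsB c.1 c.2 ∧ freeB board v w = true := by
    intro w
    simp [news, List.mem_filter]
  constructor
  · intro h
    induction h with
    | src p z hp hq hf =>
      rcases List.mem_cons.1 hp with rfl | hp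
      · exact Or.inl ((f2 z).2 ⟨hq, hf⟩)
      · by_cases hz : z ∈ news board v (nbrsB c.1 c.2)
        · exact Or.inl hz
        · exact Or.inr (Cl.src p z (List.mem_append_left _ hp) hq ((f1 z).2 ⟨hf, hz⟩))
    | step p z hc hq hf ih =>
      by_cases hz : z ∈ news board v (nbrsB c.1 c.2)
      · exact Or.inl hz
      · rcases ih with hpn | hpc
        · exact Or.inr (Cl.src p z (List.mem_append_right _ hpn) hq ((f1 z).2 ⟨hf, hz⟩))
        · exact Or.inr (Cl.step p z hpc hq ((f1 z).2 ⟨hf, hz⟩))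
  · rintro (hz | h)
    · obtain ⟨hq, hf⟩ := (f2 z).1 hz
      exact Cl.src c z List.mem_cons_self hq hf
    · induction h with
      | src p z hp hq hf =>
        obtain ⟨hf', hzn⟩ := (f1 z).1 hf
        rcases List.mem_append.1 hp with hp | hp
        · exact Cl.src p z (List.mem_cons_of_mem _ hp) hq hf'
        · obtain ⟨hq', hfp⟩ := (f2 p).1 hp
          exact Cl.step p z (Cl.src c p List.mem_cons_self hq' hfp) hq hf'
      | step p z hc hq hf ih =>
        obtain ⟨hf', hzn⟩ := (f1 z).1 hf
        exact Cl.step p z ih hq hf'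

lemma Border_nil (board : List (List String)) (v : List (List Bool)) (c : String) :
    ¬ BorderP board v [] c := by
  rintro ⟨p, hp | hp, _⟩
  · simp at hp
  · exact Cl_nil board v p hp

lemma Border_step (board : List (List String)) (v : List (List Bool)) (c : Int × Int)
    (P : List (Int × Int)) (s : String) (hs : s ≠ " ") :
    BorderP board v (c :: P) s ↔
      (∃ t ∈ nbrsB c.1 c.2, bcond board v t s = true) ∨
        BorderP board (markAll v (news board v (nbrsB c.1 c.2)))
          (P ++ news board v (nbrsB c.1 c.2)) s := by
  have hnd : (news board v (nbrsB c.1 c.2)).Nodup := news_nodup board v c.1 c.2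
  have hfree : ∀ p ∈ news board v (nbrsB c.1 c.2), freeB board v p = true :=
    news_free board v (nbrsB c.1 c.2)
  have hbc : ∀ t : Int × Int,
      bcond board (markAll v (news board v (nbrsB c.1 c.2))) t s = bcond board v t s :=
    fun t => bcond_markAll board v _ hnd hfree t s hs
  constructor
  · rintro ⟨p, hsrc, t, ht, hb⟩
    rcases hsrc with hp | hp
    · rcases List.mem_cons.1 hp with rfl | hp
      · exact Or.inl ⟨t, ht, hb⟩
      · exact Or.inr ⟨p, Or.inl (List.mem_append_left _ hp), t, ht, (hbc t).symm ▸ hb⟩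
    · rcases (Cl_step board v c P p).1 hp with hpn | hpc
      · exact Or.inr ⟨p, Or.inl (List.mem_append_right _ hpn), t, ht, (hbc t).symm ▸ hb⟩
      · exact Or.inr ⟨p, Or.inr hpc, t, ht, (hbc t).symm ▸ hb⟩
  · rintro (⟨t, ht, hb⟩ | ⟨p, hsrc, t, ht, hb⟩)
    · exact ⟨c, Or.inl List.mem_cons_self, t, ht, hb⟩
    · rw [hbc t] at hb
      rcases hsrc with hp | hp
      · rcases List.mem_append.1 hp with hp | hp
        · exact ⟨p, Or.inl (List.mem_cons_of_mem _ hp), t, ht, hb⟩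
        · exact ⟨p, Or.inr ((Cl_step board v c P p).2 (Or.inl hp)), t, ht, hb⟩
      · exact ⟨p, Or.inr ((Cl_step board v c P p).2 (Or.inr hp)), t, ht, hb⟩

lemma setfold_char (board : List (List String)) (v : List (List Bool)) (ns : List (Int × Int))
    (bp : PySem.Set String) (hnd : bp.Nodup) :
    (bfold board v (fun b => PySem.Set.add b "X") (fun b => PySem.Set.add b "O") bp ns).Nodup ∧
    ∀ s : String,
      s ∈ bfold board v (fun b => PySem.Set.add b "X") (fun b => PySem.Set.add b "O") bp ns ↔
        s ∈ bp ∨ (s = "X" ∧ ∃ t ∈ ns, bcond board v t "X" = true) ∨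
          (s = "O" ∧ ∃ t ∈ ns, bcond board v t "O" = true) := by
  induction ns generalizing bp with
  | nil => exact ⟨hnd, by simp [bfold]⟩
  | cons p t ih =>
    by_cases hX : bcond board v p "X" = true
    · have hstep : bfold board v (fun b => PySem.Set.add b "X") (fun b => PySem.Set.add b "O")
          bp (p :: t) =
          bfold board v (fun b => PySem.Set.add b "X") (fun b => PySem.Set.add b "O")
            (PySem.Set.add bp "X") t := by
        simp [bfold, List.foldl_cons, hX]
      obtain ⟨ihn, ihm⟩ := ih (PySem.Set.add bp "X") (PySem.Set.nodup_add bp "X" hnd)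
      refine ⟨hstep ▸ ihn, fun s => ?_⟩
      rw [hstep, ihm s, PySem.Set.mem_add]
      constructor
      · rintro ((h | rfl) | h | h)
        · exact Or.inl h
        · exact Or.inr (Or.inl ⟨rfl, p, List.mem_cons_self, hX⟩)
        · exact Or.inr (Or.inl ⟨h.1, by rcases h.2 with ⟨w, hw, hbw⟩; exact ⟨w, List.mem_cons_of_mem _ hw, hbw⟩⟩)
        · exact Or.inr (Or.inr ⟨h.1, by rcases h.2 with ⟨w, hw, hbw⟩; exact ⟨w, List.mem_cons_of_mem _ hw, hbw⟩⟩)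
      · rintro (h | ⟨rfl, w, hw, hbw⟩ | ⟨rfl, w, hw, hbw⟩)
        · exact Or.inl (Or.inl h)
        · exact Or.inl (Or.inr rfl)
        · rcases List.mem_cons.1 hw with rfl | hw
          · have : cellAt board w.1 w.2 = "O" := ((bcond_true_iff board v w "O").1 hbw).2
            have hX' : cellAt board w.1 w.2 = "X" := ((bcond_true_iff board v w "X").1 hX).2
            rw [hX'] at this
            exact absurd this (by decide)
          · exact Or.inr (Or.inr ⟨rfl, w, hw, hbw⟩)
    · by_cases hO : bcond board v p "O" = true
      · have hstep : bfold board v (fun b => PySem.Set.add b "X") (fun b => PySem.Set.add b "O")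
            bp (p :: t) =
            bfold board v (fun b => PySem.Set.add b "X") (fun b => PySem.Set.add b "O")
              (PySem.Set.add bp "O") t := by
          simp [bfold, List.foldl_cons, hX, hO]
        obtain ⟨ihn, ihm⟩ := ih (PySem.Set.add bp "O") (PySem.Set.nodup_add bp "O" hnd)
        refine ⟨hstep ▸ ihn, fun s => ?_⟩
        rw [hstep, ihm s, PySem.Set.mem_add]
        constructor
        · rintro ((h | rfl) | h | h)
          · exact Or.inl h
          · exact Or.inr (Or.inr ⟨rfl, p, List.mem_cons_self, hO⟩)
          · exact Or.inr (Or.inl ⟨h.1, by rcases h.2 with ⟨w, hw, hbw⟩; exact ⟨w, List.mem_cons_of_mem _ hw, hbw⟩⟩)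
          · exact Or.inr (Or.inr ⟨h.1, by rcases h.2 with ⟨w, hw, hbw⟩; exact ⟨w, List.mem_cons_of_mem _ hw, hbw⟩⟩)
        · rintro (h | ⟨rfl, w, hw, hbw⟩ | ⟨rfl, w, hw, hbw⟩)
          · exact Or.inl (Or.inl h)
          · rcases List.mem_cons.1 hw with rfl | hw
            · exact absurd hbw hX
            · exact Or.inr (Or.inl ⟨rfl, w, hw, hbw⟩)
          · exact Or.inl (Or.inr rfl)
      · have hstep : bfold board v (fun b => PySem.Set.add b "X") (fun b => PySem.Set.add b "O")
            bp (p :: t) =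
            bfold board v (fun b => PySem.Set.add b "X") (fun b => PySem.Set.add b "O") bp t := by
          simp [bfold, List.foldl_cons, hX, hO]
        obtain ⟨ihn, ihm⟩ := ih bp hnd
        refine ⟨hstep ▸ ihn, fun s => ?_⟩
        rw [hstep, ihm s]
        constructor
        · rintro (h | h | h)
          · exact Or.inl h
          · exact Or.inr (Or.inl ⟨h.1, by rcases h.2 with ⟨w, hw, hbw⟩; exact ⟨w, List.mem_cons_of_mem _ hw, hbw⟩⟩)
          · exact Or.inr (Or.inr ⟨h.1, by rcases h.2 with ⟨w, hw, hbw⟩; exact ⟨w, List.mem_cons_of_mem _ hw, hbw⟩⟩)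
        · rintro (h | ⟨rfl, w, hw, hbw⟩ | ⟨rfl, w, hw, hbw⟩)
          · exact Or.inl h
          · rcases List.mem_cons.1 hw with rfl | hw
            · exact absurd hbw hX
            · exact Or.inr (Or.inl ⟨rfl, w, hw, hbw⟩)
          · rcases List.mem_cons.1 hw with rfl | hw
            · exact absurd hbw hO
            · exact Or.inr (Or.inr ⟨rfl, w, hw, hbw⟩)

set_option maxHeartbeats 2000000 in
theorem loopA_char (board : List (List String)) (q : List (Int × Int)) (v : List (List Bool))
    (pts : Int) (bp : PySem.Set String) (hnd : bp.Nodup) :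
    (loopA board q v pts bp).1.map List.length = v.map List.length ∧
    (loopA board q v pts bp).2.1 + (fc (loopA board q v pts bp).1 : Int) = pts + (fc v : Int) ∧
    (∀ a b : Int, 0 ≤ a → 0 ≤ b →
      (Cl board v q (a, b) → entryAt (loopA board q v pts bp).1 a b = some true) ∧
      (¬ Cl board v q (a, b) → entryAt (loopA board q v pts bp).1 a b = entryAt v a b)) ∧
    (loopA board q v pts bp).2.2.Nodup ∧
    (∀ s : String, s ∈ (loopA board q v pts bp).2.2 ↔
      s ∈ bp ∨ (s = "X" ∧ BorderP board v q "X") ∨ (s = "O" ∧ BorderP board v q "O")) := by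
  match q with
  | [] =>
    have h0 : loopA board [] v pts bp = (v, pts, bp) := by rw [loopA]
    rw [h0]
    refine ⟨rfl, rfl, ?_, hnd, fun s => ?_⟩
    · intro a b _ _
      exact ⟨fun h => absurd h (Cl_nil board v (a, b)), fun _ => rfl⟩
    · have hx := Border_nil board v "X"
      have ho := Border_nil board v "O"
      tauto
  | (cx, cy) :: rest =>
    have hnds := news_nodup board v cx cy
    have hfrees := news_free board v (nbrsB cx cy)
    have hml := markAll_char board v (news board v (nbrsB cx cy)) hnds hfrees
    have hsf := setfold_char board v (nbrsB cx cy) bp hnd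
    have heq : loopA board ((cx, cy) :: rest) v pts bp =
        loopA board (rest ++ news board v (nbrsB cx cy))
          (markAll v (news board v (nbrsB cx cy)))
          (pts + (news board v (nbrsB cx cy)).length)
          (bfold board v (fun b => PySem.Set.add b "X") (fun b => PySem.Set.add b "O") bp
            (nbrsB cx cy)) := by
      conv_lhs => rw [loopA]
      rw [foldA_eq_gstep,
        gfold_char board (fun b => PySem.Set.add b "X") (fun b => PySem.Set.add b "O")
          (nbrsB cx cy) (nbrs_nodup cx cy) rest v pts bp]
    obtain ⟨ih1, ih2, ih3, ih4, ih5⟩ :=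
      loopA_char board (rest ++ news board v (nbrsB cx cy))
        (markAll v (news board v (nbrsB cx cy)))
        (pts + (news board v (nbrsB cx cy)).length)
        (bfold board v (fun b => PySem.Set.add b "X") (fun b => PySem.Set.add b "O") bp
          (nbrsB cx cy)) hsf.1
    rw [heq]
    refine ⟨?_, ?_, ?_, ih4, ?_⟩
    · rw [ih1, hml.1]
    · have h3 := hml.2.1
      omega
    · intro a b ha hb
      have hcs := Cl_step board v (cx, cy) rest (a, b)
      dsimp only at hcs
      constructor
      · intro hcl
        rcases hcs.1 hcl with hin | hcl'
        · by_cases hcl2 : Cl board (markAll v (news board v (nbrsB cx cy)))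
              (rest ++ news board v (nbrsB cx cy)) (a, b)
          · exact (ih3 a b ha hb).1 hcl2
          · rw [(ih3 a b ha hb).2 hcl2]
            exact hml.2.2.1 (a, b) hin
        · exact (ih3 a b ha hb).1 hcl'
      · intro hncl
        have hnin : (a, b) ∉ news board v (nbrsB cx cy) := fun h => hncl (hcs.2 (Or.inl h))
        have hncl' : ¬ Cl board (markAll v (news board v (nbrsB cx cy)))
            (rest ++ news board v (nbrsB cx cy)) (a, b) := fun h => hncl (hcs.2 (Or.inr h))
        rw [(ih3 a b ha hb).2 hncl']
        exact hml.2.2.2 a b ha hb hnin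
    · intro s
      rw [ih5 s, hsf.2 s]
      have hbx := Border_step board v (cx, cy) rest "X" (by decide)
      have hbo := Border_step board v (cx, cy) rest "O" (by decide)
      dsimp only at hbx hbo
      rw [hbx, hbo]
      constructor
      · rintro ((h | ⟨rfl, h⟩ | ⟨rfl, h⟩) | ⟨rfl, h⟩ | ⟨rfl, h⟩)
        · exact Or.inl h
        · exact Or.inr (Or.inl ⟨rfl, Or.inl h⟩)
        · exact Or.inr (Or.inr ⟨rfl, Or.inl h⟩)
        · exact Or.inr (Or.inl ⟨rfl, Or.inr h⟩)
        · exact Or.inr (Or.inr ⟨rfl, Or.inr h⟩)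
      · rintro (h | ⟨rfl, h | h⟩ | ⟨rfl, h | h⟩)
        · exact Or.inl (Or.inl h)
        · exact Or.inl (Or.inr (Or.inl ⟨rfl, h⟩))
        · exact Or.inr (Or.inl ⟨rfl, h⟩)
        · exact Or.inl (Or.inr (Or.inr ⟨rfl, h⟩))
        · exact Or.inr (Or.inr ⟨rfl, h⟩)
termination_by 2 * fc v + q.length
decreasing_by
  have h3 := hml.2.1
  simp only [List.length_append, List.length_cons]
  omega

-- ===== B-side machinery: the DFS closure =====

-- cells flooded by the DFS when the candidate list ns is still to be examined over visitboard v
inductive Fl (board : List (List String)) (v : List (List Bool)) (ns : List (Int × Int)) :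
    Int × Int → Prop
  | base (q) : q ∈ ns → freeB board v q = true → Fl board v ns q
  | step (p q) : Fl board v ns p → q ∈ nbrsB p.1 p.2 → freeB board v q = true → Fl board v ns q

-- some candidate, or a neighbour of a flooded cell, is an unvisited in-bounds cell of colour c
def BFl (board : List (List String)) (v : List (List Bool)) (ns : List (Int × Int))
    (c : String) : Prop :=
  (∃ t ∈ ns, bcond board v t c = true) ∨
    ∃ p, Fl board v ns p ∧ ∃ t ∈ nbrsB p.1 p.2, bcond board v t c = true

-- 'w is v with exactly the Fl-closure of ns marked' (pointwise)
def Marks (board : List (List String)) (v w : List (List Bool)) (ns : List (Int × Int)) : Prop :=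
  ∀ a b : Int, 0 ≤ a → 0 ≤ b →
    (Fl board v ns (a, b) → entryAt w a b = some true) ∧
    (¬ Fl board v ns (a, b) → entryAt w a b = entryAt v a b)

lemma bget_eq (b : List (List String)) (i j : Int) (hi : 0 ≤ i) (hj : 0 ≤ j) :
    bget b i j = cellAt b i j := by
  simp only [cellAt, PySem.List.pyGet?_of_nonneg b hi]
  cases hv : b[i.toNat]? with
  | none => simp [bget, List.getD_eq_getElem?_getD, hv]
  | some r =>
    simp only [hv, Option.bind_some, PySem.List.pyGet?_of_nonneg r hj]
    cases hr : r[j.toNat]? with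
    | none => simp [bget, List.getD_eq_getElem?_getD, hv, hr]
    | some s => simp [bget, List.getD_eq_getElem?_getD, hv, hr]

lemma Fl_free (board : List (List String)) (v : List (List Bool)) (ns : List (Int × Int))
    (z : Int × Int) (h : Fl board v ns z) : freeB board v z = true := by
  cases h with
  | base q hq hf => exact hf
  | step p q hc hq hf => exact hf

lemma Fl_nil (board : List (List String)) (v : List (List Bool)) (z : Int × Int) :
    ¬ Fl board v [] z := by
  intro h
  induction h with
  | base q hq => simp at hq
  | step p q hc hq hf ih => exact ih

lemma BFl_nil (board : List (List String)) (v : List (List Bool)) (c : String) :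
    ¬ BFl board v [] c := by
  rintro (⟨t, ht, _⟩ | ⟨p, hp, _⟩)
  · simp at ht
  · exact Fl_nil board v p hp

lemma Fl_cons_not_free (board : List (List String)) (v : List (List Bool)) (p : Int × Int)
    (rest : List (Int × Int)) (hp : freeB board v p = false) (z : Int × Int) :
    Fl board v (p :: rest) z ↔ Fl board v rest z := by
  constructor <;> intro h
  · induction h with
    | base q hq hf =>
      rcases List.mem_cons.1 hq with rfl | hq
      · rw [hp] at hf; exact absurd hf (by simp)
      · exact Fl.base q hq hf
    | step p' q hc hq hf ih => exact Fl.step p' q ih hq hf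
  · induction h with
    | base q hq hf => exact Fl.base q (List.mem_cons_of_mem _ hq) hf
    | step p' q hc hq hf ih => exact Fl.step p' q ih hq hf

lemma BFl_cons_not_free (board : List (List String)) (v : List (List Bool)) (p : Int × Int)
    (rest : List (Int × Int)) (hp : freeB board v p = false) (c : String) :
    BFl board v (p :: rest) c ↔ (bcond board v p c = true ∨ BFl board v rest c) := by
  unfold BFl
  constructor
  · rintro (⟨t, ht, hb⟩ | ⟨q, hq, ht⟩)
    · rcases List.mem_cons.1 ht with rfl | ht
      · exact Or.inl hb
      · exact Or.inr (Or.inl ⟨t, ht, hb⟩)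
    · exact Or.inr (Or.inr ⟨q, (Fl_cons_not_free board v p rest hp q).1 hq, ht⟩)
  · rintro (hb | ⟨t, ht, hb⟩ | ⟨q, hq, ht⟩)
    · exact Or.inl ⟨p, List.mem_cons_self, hb⟩
    · exact Or.inl ⟨t, List.mem_cons_of_mem _ ht, hb⟩
    · exact Or.inr ⟨q, (Fl_cons_not_free board v p rest hp q).2 hq, ht⟩

-- the DFS decomposition: examining a fresh ' ' candidate p first floods Fl of its neighbours
-- over the board with p marked, and the remaining candidates flood over the resulting board w
lemma Fl_dfs (board : List (List String)) (v w : List (List Bool)) (p : Int × Int)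
    (rest : List (Int × Int)) (hfree : freeB board v p = true)
    (hw : Marks board (setTrue v p.1 p.2) w (nbrsB p.1 p.2)) (z : Int × Int) :
    Fl board v (p :: rest) z ↔
      (z = p ∨ Fl board (setTrue v p.1 p.2) (nbrsB p.1 p.2) z ∨ Fl board w rest z) := by
  obtain ⟨hp1, hp2, hent, hcell, hoob⟩ := freeB_elim board v p hfree
  have hsome : (entryAt v p.1 p.2).isSome := by simp [hent]
  have hself : entryAt (setTrue v p.1 p.2) p.1 p.2 = some true :=
    entry_setTrue_self v p.1 p.2 hp1 hp2 hent
  -- freeB over v' = setTrue v p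
  have hfv' : ∀ q : Int × Int, freeB board (setTrue v p.1 p.2) q = true ↔
      (freeB board v q = true ∧ q ≠ p) := by
    intro q
    by_cases hqoob : oobA board q.1 q.2 = false
    · obtain ⟨ha, _, hb, _⟩ := oob_false _ _ _ hqoob
      by_cases hqp : q = p
      · subst hqp
        simp [freeB, bcond, hself]
      · rw [freeB, bcond_setTrue_ne board v p.1 p.2 q " " hp1 hp2 hsome
          (by simpa [Prod.ext_iff] using hqp)]
        simp [freeB, hqp]
    · simp only [Bool.not_eq_false] at hqoob
      simp [freeB, bcond, hqoob]
  -- freeB over w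
  have hfw : ∀ q : Int × Int, freeB board w q = true ↔
      (freeB board (setTrue v p.1 p.2) q = true ∧
        ¬ Fl board (setTrue v p.1 p.2) (nbrsB p.1 p.2) q) := by
    intro q
    by_cases hqoob : oobA board q.1 q.2 = false
    · obtain ⟨ha, _, hb, _⟩ := oob_false _ _ _ hqoob
      by_cases hM : Fl board (setTrue v p.1 p.2) (nbrsB p.1 p.2) q
      · have := (hw q.1 q.2 ha hb).1 (by rwa [Prod.mk.eta])
        simp [freeB, bcond, this, hM]
      · have := (hw q.1 q.2 ha hb).2 (by rwa [Prod.mk.eta])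
        rw [freeB, bcond, this]
        simp [freeB, bcond, hM]
    · simp only [Bool.not_eq_false] at hqoob
      simp [freeB, bcond, hqoob]
  constructor
  · intro h
    induction h with
    | base q hq hf =>
      by_cases hqp : q = p
      · exact Or.inl hqp
      · by_cases hM : Fl board (setTrue v p.1 p.2) (nbrsB p.1 p.2) q
        · exact Or.inr (Or.inl hM)
        · rcases List.mem_cons.1 hq with rfl | hq
          · exact absurd rfl hqp
          · exact Or.inr (Or.inr (Fl.base q hq ((hfw q).2 ⟨(hfv' q).2 ⟨hf, hqp⟩, hM⟩)))
    | step p' q hc hq hf ih =>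
      by_cases hqp : q = p
      · exact Or.inl hqp
      · by_cases hM : Fl board (setTrue v p.1 p.2) (nbrsB p.1 p.2) q
        · exact Or.inr (Or.inl hM)
        · have hfq' : freeB board (setTrue v p.1 p.2) q = true := (hfv' q).2 ⟨hf, hqp⟩
          rcases ih with rfl | hM' | hW
          · exact absurd (Fl.base q hq hfq') hM
          · exact absurd (Fl.step p' q hM' hq hfq') hM
          · exact Or.inr (Or.inr (Fl.step p' q hW hq ((hfw q).2 ⟨hfq', hM⟩)))
  · rintro (rfl | hM | hW)
    · exact Fl.base z List.mem_cons_self hfree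
    · induction hM with
      | base q hq hf =>
        exact Fl.step p q (Fl.base p List.mem_cons_self hfree) hq ((hfv' q).1 hf).1
      | step p' q hc hq hf ih => exact Fl.step p' q ih hq ((hfv' q).1 hf).1
    · induction hW with
      | base q hq hf =>
        exact Fl.base q (List.mem_cons_of_mem _ hq) ((hfv' q).1 ((hfw q).1 hf).1).1
      | step p' q hc hq hf ih => exact Fl.step p' q ih hq ((hfv' q).1 ((hfw q).1 hf).1).1

-- bcond for colours is untouched by marking ' ' cells
lemma bcond_v' (board : List (List String)) (v : List (List Bool)) (p : Int × Int)
    (hfree : freeB board v p = true) (c : String) (hc : c ≠ " ") (t : Int × Int) :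
    bcond board (setTrue v p.1 p.2) t c = bcond board v t c := by
  obtain ⟨hp1, hp2, hent, hcell, hoob⟩ := freeB_elim board v p hfree
  by_cases htp : t = p
  · subst htp
    have hcc : (cellAt board t.1 t.2 == c) = false := by
      simp [hcell]
      exact fun h => hc h.symm
    simp [bcond, hcc]
  · exact bcond_setTrue_ne board v p.1 p.2 t c hp1 hp2 (by simp [hent])
      (by simpa [Prod.ext_iff] using htp)

lemma bcond_marks (board : List (List String)) (v w : List (List Bool)) (ns : List (Int × Int))
    (hw : Marks board v w ns) (c : String) (hc : c ≠ " ") (t : Int × Int) :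
    bcond board w t c = bcond board v t c := by
  by_cases hoob : oobA board t.1 t.2 = false
  · obtain ⟨ha, _, hb, _⟩ := oob_false _ _ _ hoob
    by_cases hM : Fl board v ns t
    · have hcell : cellAt board t.1 t.2 = " " := (freeB_elim board v t (Fl_free _ _ _ _ hM)).2.2.2.1
      have hcc : (cellAt board t.1 t.2 == c) = false := by
        simp [hcell]
        exact fun h => hc h.symm
      simp [bcond, hcc]
    · have := (hw t.1 t.2 ha hb).2 (by rwa [Prod.mk.eta])
      rw [bcond, bcond, this]
  · simp only [Bool.not_eq_false] at hoob
    simp [bcond, hoob]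

lemma BFl_dfs (board : List (List String)) (v w : List (List Bool)) (p : Int × Int)
    (rest : List (Int × Int)) (hfree : freeB board v p = true)
    (hw : Marks board (setTrue v p.1 p.2) w (nbrsB p.1 p.2)) (c : String) (hc : c ≠ " ") :
    BFl board v (p :: rest) c ↔
      (BFl board (setTrue v p.1 p.2) (nbrsB p.1 p.2) c ∨ BFl board w rest c) := by
  obtain ⟨hp1, hp2, hent, hcell, hoob⟩ := freeB_elim board v p hfree
  have hbv : ∀ t, bcond board (setTrue v p.1 p.2) t c = bcond board v t c :=
    bcond_v' board v p hfree c hc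
  have hbw : ∀ t, bcond board w t c = bcond board v t c := by
    intro t
    rw [bcond_marks board (setTrue v p.1 p.2) w (nbrsB p.1 p.2) hw c hc t, hbv t]
  have hbp : bcond board v p c = false := by
    have hcc : (cellAt board p.1 p.2 == c) = false := by
      simp [hcell]
      exact fun h => hc h.symm
    simp [bcond, hcc]
  unfold BFl
  constructor
  · rintro (⟨t, ht, hb⟩ | ⟨q, hq, t, ht, hb⟩)
    · rcases List.mem_cons.1 ht with rfl | ht
      · rw [hbp] at hb; exact absurd hb (by simp)
      · exact Or.inr (Or.inl ⟨t, ht, by rw [hbw t]; exact hb⟩)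
    · rcases (Fl_dfs board v w p rest hfree hw q).1 hq with rfl | hM | hW
      · exact Or.inl (Or.inl ⟨t, ht, by rw [hbv t]; exact hb⟩)
      · exact Or.inl (Or.inr ⟨q, hM, t, ht, by rw [hbv t]; exact hb⟩)
      · exact Or.inr (Or.inr ⟨q, hW, t, ht, by rw [hbw t]; exact hb⟩)
  · rintro ((⟨t, ht, hb⟩ | ⟨q, hq, t, ht, hb⟩) | (⟨t, ht, hb⟩ | ⟨q, hq, t, ht, hb⟩))
    · exact Or.inr ⟨p, (Fl_dfs board v w p rest hfree hw p).2 (Or.inl rfl), t, ht,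
        by rw [hbv t] at hb; exact hb⟩
    · exact Or.inr ⟨q, (Fl_dfs board v w p rest hfree hw q).2 (Or.inr (Or.inl hq)), t, ht,
        by rw [hbv t] at hb; exact hb⟩
    · exact Or.inl ⟨t, List.mem_cons_of_mem _ ht, by rw [hbw t] at hb; exact hb⟩
    · exact Or.inr ⟨q, (Fl_dfs board v w p rest hfree hw q).2 (Or.inr (Or.inr hq)), t, ht,
        by rw [hbw t] at hb; exact hb⟩

lemma vget_iff (v : List (List Bool)) (i j : Int) (hi : 0 ≤ i) (hj : 0 ≤ j) :
    vget v i j = false ↔ entryAt v i j = some false := by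
  simp only [entryAt, PySem.List.pyGet?_of_nonneg v hi]
  cases hv : v[i.toNat]? with
  | none => simp [vget, List.getD_eq_getElem?_getD, hv]
  | some r =>
    simp only [hv, Option.bind_some, PySem.List.pyGet?_of_nonneg r hj]
    cases hr : r[j.toNat]? with
    | none => simp [vget, List.getD_eq_getElem?_getD, hv, hr]
    | some b => simp [vget, List.getD_eq_getElem?_getD, hv, hr]

lemma vmark_eq (v : List (List Bool)) (i j : Int) (hi : 0 ≤ i) (hj : 0 ≤ j) :
    vmark v i j = setTrue v i j := by
  rw [setTrue, PySem.List.pySetD_of_nonneg _ _ hj, PySem.List.pySetD_of_nonneg _ _ hi,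
    PySem.List.pyGetD_of_nonneg v [] hi]
  rfl

lemma unvis_eq_fc (v : List (List Bool)) : unvis v = fc v := by
  unfold unvis fc
  induction v with
  | nil => rfl
  | cons r t ih =>
    simp only [List.flatten_cons, List.count_append, List.map, List.sum_cons]
    omega

-- one-step value equations for go
lemma go_nil_val (board : List (List String)) (n : Int)
    (st : List (List Bool) × Int × Bool × Bool) : (go board n [] st).val = st := by
  rw [go]

lemma go_cons_val_space (board : List (List String)) (n : Int) (nx ny : Int)
    (rest : List (Int × Int)) (st : List (List Bool) × Int × Bool × Bool)
    (hg : (0 ≤ nx ∧ nx < n ∧ 0 ≤ ny ∧ ny < n) ∧ vget st.1 nx ny = false)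
    (hsp : bget board nx ny = " ") :
    (go board n ((nx, ny) :: rest) st).val =
      (go board n rest
        (go board n (nbrsB nx ny) (vmark st.1 nx ny, st.2.1 + 1, st.2.2)).val).val := by
  rw [go]
  rw [dif_pos hg, if_pos hsp]

lemma go_cons_val_x (board : List (List String)) (n : Int) (nx ny : Int)
    (rest : List (Int × Int)) (st : List (List Bool) × Int × Bool × Bool)
    (hg : (0 ≤ nx ∧ nx < n ∧ 0 ≤ ny ∧ ny < n) ∧ vget st.1 nx ny = false)
    (hsp : bget board nx ny ≠ " ") (hx : bget board nx ny = "X") :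
    (go board n ((nx, ny) :: rest) st).val =
      (go board n rest (st.1, st.2.1, true, st.2.2.2)).val := by
  rw [go]
  rw [dif_pos hg, if_neg hsp, if_pos hx]

lemma go_cons_val_o (board : List (List String)) (n : Int) (nx ny : Int)
    (rest : List (Int × Int)) (st : List (List Bool) × Int × Bool × Bool)
    (hg : (0 ≤ nx ∧ nx < n ∧ 0 ≤ ny ∧ ny < n) ∧ vget st.1 nx ny = false)
    (hsp : bget board nx ny ≠ " ") (hx : bget board nx ny ≠ "X")
    (ho : bget board nx ny = "O") :
    (go board n ((nx, ny) :: rest) st).val =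
      (go board n rest (st.1, st.2.1, st.2.2.1, true)).val := by
  rw [go]
  rw [dif_pos hg, if_neg hsp, if_neg hx, if_pos ho]

lemma go_cons_val_other (board : List (List String)) (n : Int) (nx ny : Int)
    (rest : List (Int × Int)) (st : List (List Bool) × Int × Bool × Bool)
    (hg : (0 ≤ nx ∧ nx < n ∧ 0 ≤ ny ∧ ny < n) ∧ vget st.1 nx ny = false)
    (hsp : bget board nx ny ≠ " ") (hx : bget board nx ny ≠ "X")
    (ho : bget board nx ny ≠ "O") :
    (go board n ((nx, ny) :: rest) st).val = (go board n rest st).val := by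
  rw [go]
  rw [dif_pos hg, if_neg hsp, if_neg hx, if_neg ho]

lemma go_cons_val_fail (board : List (List String)) (n : Int) (nx ny : Int)
    (rest : List (Int × Int)) (st : List (List Bool) × Int × Bool × Bool)
    (hg : ¬ ((0 ≤ nx ∧ nx < n ∧ 0 ≤ ny ∧ ny < n) ∧ vget st.1 nx ny = false)) :
    (go board n ((nx, ny) :: rest) st).val = (go board n rest st).val := by
  rw [go]
  rw [dif_neg hg]

-- guard failure kills every bcond at the candidate
lemma bcond_of_not_guard (board : List (List String)) (v : List (List Bool)) (nx ny : Int)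
    (h : ¬ ((0 ≤ nx ∧ nx < (board.length : Int) ∧ 0 ≤ ny ∧ ny < (board.length : Int)) ∧
      vget v nx ny = false)) (c : String) : bcond board v (nx, ny) c = false := by
  by_cases hinb : 0 ≤ nx ∧ nx < (board.length : Int) ∧ 0 ≤ ny ∧ ny < (board.length : Int)
  · have hv : vget v nx ny ≠ false := fun hf => h ⟨hinb, hf⟩
    have hent : entryAt v nx ny ≠ some false :=
      fun he => hv ((vget_iff v nx ny hinb.1 hinb.2.2.1).2 he)
    simp [bcond, hent]
  · have hoob : oobA board nx ny = true := by
      rcases Bool.eq_false_or_eq_true (oobA board nx ny) with ht | hf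
      · exact ht
      · exact absurd ((oobA_eq_false_iff board nx ny).1 hf) hinb
    simp [bcond, hoob]

set_option maxHeartbeats 2000000 in
theorem go_char (board : List (List String)) (cands : List (Int × Int))
    (st : List (List Bool) × Int × Bool × Bool) :
    ((go board (board.length : Int) cands st).val.1.map List.length = st.1.map List.length) ∧
    ((go board (board.length : Int) cands st).val.2.1 +
        (fc (go board (board.length : Int) cands st).val.1 : Int) =
      st.2.1 + (fc st.1 : Int)) ∧
    Marks board st.1 (go board (board.length : Int) cands st).val.1 cands ∧
    ((go board (board.length : Int) cands st).val.2.2.1 = true ↔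
      st.2.2.1 = true ∨ BFl board st.1 cands "X") ∧
    ((go board (board.length : Int) cands st).val.2.2.2 = true ↔
      st.2.2.2 = true ∨ BFl board st.1 cands "O") := by
  match cands with
  | [] =>
    rw [go_nil_val]
    refine ⟨rfl, rfl, ?_, ?_, ?_⟩
    · intro a b _ _
      exact ⟨fun h => absurd h (Fl_nil board st.1 (a, b)), fun _ => rfl⟩
    · have := BFl_nil board st.1 "X"
      tauto
    · have := BFl_nil board st.1 "O"
      tauto
  | (nx, ny) :: rest =>
    by_cases hg : (0 ≤ nx ∧ nx < (board.length : Int) ∧ 0 ≤ ny ∧ ny < (board.length : Int)) ∧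
        vget st.1 nx ny = false
    · have hnx : 0 ≤ nx := hg.1.1
      have hny : 0 ≤ ny := hg.1.2.2.1
      have hoob : oobA board nx ny = false := (oobA_eq_false_iff board nx ny).2 hg.1
      have hent : entryAt st.1 nx ny = some false := (vget_iff st.1 nx ny hnx hny).1 hg.2
      by_cases hsp : bget board nx ny = " "
      · -- fresh ' ' candidate: mark it, recurse into its neighbours, then the rest
        have hcell : cellAt board nx ny = " " := by rw [← bget_eq board nx ny hnx hny]; exact hsp
        have hfree : freeB board st.1 (nx, ny) = true := by
          simp [freeB, bcond, hoob, hent, hcell]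
        have hfc : fc (setTrue st.1 nx ny) + 1 = fc st.1 := fc_setTrue _ _ _ hnx hny hent
        obtain ⟨i1, i2, i3, i4, i5⟩ :=
          go_char board (nbrsB nx ny) (setTrue st.1 nx ny, st.2.1 + 1, st.2.2)
        dsimp only at i1 i2 i3 i4 i5
        obtain ⟨j1, j2, j3, j4, j5⟩ :=
          go_char board rest
            (go board (board.length : Int) (nbrsB nx ny)
              (setTrue st.1 nx ny, st.2.1 + 1, st.2.2)).val
        have hw : Marks board (setTrue st.1 nx ny)
            (go board (board.length : Int) (nbrsB nx ny)
              (setTrue st.1 nx ny, st.2.1 + 1, st.2.2)).val.1 (nbrsB nx ny) := i3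
        have hdfs := fun z => Fl_dfs board st.1
          (go board (board.length : Int) (nbrsB nx ny)
            (setTrue st.1 nx ny, st.2.1 + 1, st.2.2)).val.1 (nx, ny) rest hfree hw z
        have hbdfs := fun c hc => BFl_dfs board st.1
          (go board (board.length : Int) (nbrsB nx ny)
            (setTrue st.1 nx ny, st.2.1 + 1, st.2.2)).val.1 (nx, ny) rest hfree hw c hc
        rw [go_cons_val_space board (board.length : Int) nx ny rest st hg hsp,
          vmark_eq st.1 nx ny hnx hny]
        have hself : entryAt (setTrue st.1 nx ny) nx ny = some true :=
          entry_setTrue_self st.1 nx ny hnx hny hent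
        have hnotM : ¬ Fl board (setTrue st.1 nx ny) (nbrsB nx ny) (nx, ny) := by
          intro hM
          have h2 := (freeB_elim board _ _ (Fl_free _ _ _ _ hM)).2.2.1
          dsimp only at h2
          rw [hself] at h2
          exact absurd h2 (by simp)
        refine ⟨?_, ?_, ?_, ?_, ?_⟩
        · rw [j1, i1, maplen_setTrue st.1 nx ny hnx hny]
        · have e2 := i2
          have e1 := j2
          omega
        · intro a b ha hb
          constructor
          · intro hFl
            rcases (hdfs (a, b)).1 hFl with heq | hM | hW
            · rw [Prod.mk.injEq] at heq
              obtain ⟨rfl, rfl⟩ := heq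
              have hmidp := (hw a b ha hb).2 hnotM
              rw [hself] at hmidp
              by_cases hW2 : Fl board
                  (go board (board.length : Int) (nbrsB a b)
                    (setTrue st.1 a b, st.2.1 + 1, st.2.2)).val.1 rest (a, b)
              · exact (j3 a b ha hb).1 hW2
              · rw [(j3 a b ha hb).2 hW2]
                exact hmidp
            · have hmidp := (hw a b ha hb).1 hM
              by_cases hW2 : Fl board
                  (go board (board.length : Int) (nbrsB nx ny)
                    (setTrue st.1 nx ny, st.2.1 + 1, st.2.2)).val.1 rest (a, b)
              · exact (j3 a b ha hb).1 hW2
              · rw [(j3 a b ha hb).2 hW2]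
                exact hmidp
            · exact (j3 a b ha hb).1 hW
          · intro hnFl
            have hne : (a, b) ≠ (nx, ny) := fun h => hnFl ((hdfs (a, b)).2 (Or.inl h))
            have hnM : ¬ Fl board (setTrue st.1 nx ny) (nbrsB nx ny) (a, b) :=
              fun h => hnFl ((hdfs (a, b)).2 (Or.inr (Or.inl h)))
            have hnW : ¬ Fl board
                (go board (board.length : Int) (nbrsB nx ny)
                  (setTrue st.1 nx ny, st.2.1 + 1, st.2.2)).val.1 rest (a, b) :=
              fun h => hnFl ((hdfs (a, b)).2 (Or.inr (Or.inr h)))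
            rw [(j3 a b ha hb).2 hnW, (hw a b ha hb).2 hnM,
              entry_setTrue_ne st.1 nx ny a b hnx hny ha hb (by simp [hent]) hne]
        · rw [j4, i4, hbdfs "X" (by decide)]
          tauto
        · rw [j5, i5, hbdfs "O" (by decide)]
          tauto
      · -- candidate is not a fresh ' ' cell: it only (possibly) sets a flag
        have hcell : cellAt board nx ny = bget board nx ny :=
          (bget_eq board nx ny hnx hny).symm
        have hfree : freeB board st.1 (nx, ny) = false := by
          have : (cellAt board nx ny == " ") = false := by
            simp [hcell]
            exact hsp
          simp [freeB, bcond, this]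
        have hflc := fun z => Fl_cons_not_free board st.1 (nx, ny) rest hfree z
        have hbflc := fun c => BFl_cons_not_free board st.1 (nx, ny) rest hfree c
        by_cases hx : bget board nx ny = "X"
        · have hbX : bcond board st.1 (nx, ny) "X" = true := by
            simp [bcond, hoob, hent, hcell, hx]
          have hbO : bcond board st.1 (nx, ny) "O" = false := by
            simp [bcond, hcell, hx]
          obtain ⟨j1, j2, j3, j4, j5⟩ := go_char board rest (st.1, st.2.1, true, st.2.2.2)
          dsimp only at j1 j2 j3 j4 j5
          rw [go_cons_val_x board (board.length : Int) nx ny rest st hg hsp hx]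
          refine ⟨j1, j2, ?_, ?_, ?_⟩
          · intro a b ha hb
            exact ⟨fun h => (j3 a b ha hb).1 ((hflc (a, b)).1 h),
                fun h => (j3 a b ha hb).2 (fun h2 => h ((hflc (a, b)).2 h2))⟩
          · rw [j4, hbflc "X"]
            simp [hbX]
          · rw [j5, hbflc "O"]
            simp [hbO]
        · by_cases ho : bget board nx ny = "O"
          · have hbO : bcond board st.1 (nx, ny) "O" = true := by
              simp [bcond, hoob, hent, hcell, ho]
            have hbX : bcond board st.1 (nx, ny) "X" = false := by
              simp [bcond, hcell, ho]
            obtain ⟨j1, j2, j3, j4, j5⟩ := go_char board rest (st.1, st.2.1, st.2.2.1, true)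
            dsimp only at j1 j2 j3 j4 j5
            rw [go_cons_val_o board (board.length : Int) nx ny rest st hg hsp hx ho]
            refine ⟨j1, j2, ?_, ?_, ?_⟩
            · intro a b ha hb
              exact ⟨fun h => (j3 a b ha hb).1 ((hflc (a, b)).1 h),
                fun h => (j3 a b ha hb).2 (fun h2 => h ((hflc (a, b)).2 h2))⟩
            · rw [j4, hbflc "X"]
              simp [hbX]
            · rw [j5, hbflc "O"]
              simp [hbO]
          · have hbX : bcond board st.1 (nx, ny) "X" = false := by
              simp [bcond, hcell, hx]
            have hbO : bcond board st.1 (nx, ny) "O" = false := by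
              simp [bcond, hcell, ho]
            obtain ⟨j1, j2, j3, j4, j5⟩ := go_char board rest st
            rw [go_cons_val_other board (board.length : Int) nx ny rest st hg hsp hx ho]
            refine ⟨j1, j2, ?_, ?_, ?_⟩
            · intro a b ha hb
              exact ⟨fun h => (j3 a b ha hb).1 ((hflc (a, b)).1 h),
                fun h => (j3 a b ha hb).2 (fun h2 => h ((hflc (a, b)).2 h2))⟩
            · rw [j4, hbflc "X"]
              simp [hbX]
            · rw [j5, hbflc "O"]
              simp [hbO]
    · -- out of bounds or already visited: nothing happens
      have hbc := fun c => bcond_of_not_guard board st.1 nx ny hg c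
      have hfree : freeB board st.1 (nx, ny) = false := hbc " "
      have hflc := fun z => Fl_cons_not_free board st.1 (nx, ny) rest hfree z
      have hbflc := fun c => BFl_cons_not_free board st.1 (nx, ny) rest hfree c
      obtain ⟨j1, j2, j3, j4, j5⟩ := go_char board rest st
      rw [go_cons_val_fail board (board.length : Int) nx ny rest st hg]
      refine ⟨j1, j2, ?_, ?_, ?_⟩
      · intro a b ha hb
        exact ⟨fun h => (j3 a b ha hb).1 ((hflc (a, b)).1 h),
          fun h => (j3 a b ha hb).2 (fun h2 => h ((hflc (a, b)).2 h2))⟩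
      · rw [j4, hbflc "X"]
        simp [hbc "X"]
      · rw [j5, hbflc "O"]
        simp [hbc "O"]
termination_by 5 * fc st.1 + cands.length
decreasing_by
  all_goals simp only [nbrsB_len, List.length_cons, List.length_nil]
  all_goals first
    | omega
    | (have hfc' : fc (setTrue st.1 nx ny) + 1 = fc st.1 :=
         fc_setTrue st.1 nx ny hg.1.1 hg.1.2.2.1
           ((vget_iff st.1 nx ny hg.1.1 hg.1.2.2.1).1 hg.2)
       first
         | omega
         | (have hprop := (go board (board.length : Int) (nbrsB nx ny)
              (setTrue st.1 nx ny, st.2.1 + 1, st.2.2)).property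
            dsimp only at hprop
            have hu1 := unvis_eq_fc (go board (board.length : Int) (nbrsB nx ny)
              (setTrue st.1 nx ny, st.2.1 + 1, st.2.2)).val.1
            have hu2 := unvis_eq_fc (setTrue st.1 nx ny)
            omega))

-- ===== bridge: A's closure from the start queue = B's closure from the start's neighbours =====

lemma Cl_iff_Fl (board : List (List String)) (v : List (List Bool)) (x y : Int)
    (z : Int × Int) : Cl board v [(x, y)] z ↔ Fl board v (nbrsB x y) z := by
  constructor <;> intro h
  · induction h with
    | src p q hp hq hf =>
      rcases List.mem_singleton.1 hp with rfl
      exact Fl.base q hq hf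
    | step p q hc hq hf ih => exact Fl.step p q ih hq hf
  · induction h with
    | base q hq hf => exact Cl.src (x, y) q (List.mem_singleton_self _) hq hf
    | step p q hc hq hf ih => exact Cl.step p q ih hq hf

lemma BorderP_iff_BFl (board : List (List String)) (v : List (List Bool)) (x y : Int)
    (c : String) : BorderP board v [(x, y)] c ↔ BFl board v (nbrsB x y) c := by
  unfold BorderP BFl
  constructor
  · rintro ⟨p, hp | hp, t, ht, hb⟩
    · rcases List.mem_singleton.1 hp with rfl
      exact Or.inl ⟨t, ht, hb⟩
    · exact Or.inr ⟨p, (Cl_iff_Fl board v x y p).1 hp, t, ht, hb⟩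
  · rintro (⟨t, ht, hb⟩ | ⟨p, hp, t, ht, hb⟩)
    · exact ⟨(x, y), Or.inl (List.mem_singleton_self _), t, ht, hb⟩
    · exact ⟨p, Or.inr ((Cl_iff_Fl board v x y p).2 hp), t, ht, hb⟩

lemma nodup_single_of_mem_iff {l : List String} {a : String} (hnd : l.Nodup)
    (h : ∀ s, s ∈ l ↔ s = a) : l = [a] := by
  cases l with
  | nil => exact absurd ((h a).2 rfl) (List.not_mem_nil)
  | cons b t =>
    have hb : b = a := (h b).1 (List.mem_cons_self)
    subst hb
    have ht : t = [] := by
      rw [List.eq_nil_iff_forall_not_mem]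
      intro s hs
      have := (h s).1 (List.mem_cons_of_mem _ hs)
      subst this
      exact (List.nodup_cons.1 hnd).1 hs
    rw [ht]

lemma maplen_getElem {w u : List (List Bool)} (h : w.map List.length = u.map List.length)
    (i : Nat) (hi : i < w.length) (hi' : i < u.length) : w[i].length = u[i].length := by
  have h1 : (w.map List.length)[i]'(by simpa using hi) = (u.map List.length)[i]'(by simpa using hi') :=
    List.getElem_of_eq h _
  simpa using h1

lemma len_ne_one_of_two_mem {l : List String} (hx : "X" ∈ l) (ho : "O" ∈ l) : l.length ≠ 1 := by
  intro hlen
  rw [List.length_eq_one_iff] at hlen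
  obtain ⟨a, rfl⟩ := hlen
  simp at hx ho
  rw [← hx] at ho
  exact absurd ho (by decide)

theorem bfs_equal_all (board : List (List String)) (x : Int) (y : Int)
    (visitboard : List (List Bool)) : bfs board x y visitboard = bfs_alt board x y visitboard := by
  obtain ⟨a1, a2, a3, a4, a5⟩ :=
    loopA_char board [(x, y)] visitboard 1 PySem.Set.empty List.nodup_nil
  obtain ⟨b1, b2, b3, b4, b5⟩ := go_char board (nbrsB x y) (visitboard, 1, false, false)
  dsimp only at b1 b2 b3 b4 b5
  have hlenA : (loopA board [(x, y)] visitboard 1 PySem.Set.empty).1.length =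
      visitboard.length := by
    have := congrArg List.length a1
    simpa using this
  have hlenB : (go board (board.length : Int) (nbrsB x y) (visitboard, 1, false, false)).val.1.length =
      visitboard.length := by
    have := congrArg List.length b1
    simpa using this
  have hvb : (loopA board [(x, y)] visitboard 1 PySem.Set.empty).1 =
      (go board (board.length : Int) (nbrsB x y) (visitboard, 1, false, false)).val.1 := by
    apply List.ext_getElem (by rw [hlenA, hlenB])
    intro i hiA hiB
    apply List.ext_getElem
      (by rw [maplen_getElem a1 i hiA (by omega), maplen_getElem b1 i hiB (by omega)])
    intro j hjA hjB
    have hEA : entryAt (loopA board [(x, y)] visitboard 1 PySem.Set.empty).1 (i : Int) (j : Int) =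
        some ((loopA board [(x, y)] visitboard 1 PySem.Set.empty).1[i][j]) :=
      entry_getElem _ i j hiA hjA
    have hEB : entryAt (go board (board.length : Int) (nbrsB x y) (visitboard, 1, false, false)).val.1
        (i : Int) (j : Int) =
        some ((go board (board.length : Int) (nbrsB x y) (visitboard, 1, false, false)).val.1[i][j]) :=
      entry_getElem _ i j hiB hjB
    by_cases hcl : Cl board visitboard [(x, y)] ((i : Int), (j : Int))
    · have h1 := (a3 (i : Int) (j : Int) (by positivity) (by positivity)).1 hcl
      have h2 := (b3 (i : Int) (j : Int) (by positivity) (by positivity)).1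
        ((Cl_iff_Fl board visitboard x y _).1 hcl)
      rw [hEA] at h1
      rw [hEB] at h2
      rw [Option.some_inj.1 h1, Option.some_inj.1 h2]
    · have h1 := (a3 (i : Int) (j : Int) (by positivity) (by positivity)).2 hcl
      have h2 := (b3 (i : Int) (j : Int) (by positivity) (by positivity)).2
        (fun hf => hcl ((Cl_iff_Fl board visitboard x y _).2 hf))
      rw [hEA] at h1
      rw [hEB] at h2
      rw [← h2] at h1
      exact Option.some_inj.1 h1
  have hpts : (loopA board [(x, y)] visitboard 1 PySem.Set.empty).2.1 =
      (go board (board.length : Int) (nbrsB x y) (visitboard, 1, false, false)).val.2.1 := by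
    rw [hvb] at a2
    omega
  have hBX : (go board (board.length : Int) (nbrsB x y) (visitboard, 1, false, false)).val.2.2.1 = true ↔
      BorderP board visitboard [(x, y)] "X" := by
    rw [b4, BorderP_iff_BFl]
    simp
  have hBO : (go board (board.length : Int) (nbrsB x y) (visitboard, 1, false, false)).val.2.2.2 = true ↔
      BorderP board visitboard [(x, y)] "O" := by
    rw [b5, BorderP_iff_BFl]
    simp
  have hmem : ∀ s : String, s ∈ (loopA board [(x, y)] visitboard 1 PySem.Set.empty).2.2 ↔
      (s = "X" ∧ BorderP board visitboard [(x, y)] "X") ∨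
        (s = "O" ∧ BorderP board visitboard [(x, y)] "O") := by
    intro s
    rw [a5 s]
    simp [PySem.Set.empty]
  simp only [bfs, bfs_alt]
  refine Prod.ext hvb (Prod.ext hpts ?_)
  simp only
  by_cases hbx : BorderP board visitboard [(x, y)] "X" <;>
    by_cases hbo : BorderP board visitboard [(x, y)] "O"
  · have e1 := hBX.2 hbx
    have e2 := hBO.2 hbo
    have hxm : "X" ∈ (loopA board [(x, y)] visitboard 1 PySem.Set.empty).2.2 :=
      (hmem "X").2 (Or.inl ⟨rfl, hbx⟩)
    have hom : "O" ∈ (loopA board [(x, y)] visitboard 1 PySem.Set.empty).2.2 :=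
      (hmem "O").2 (Or.inr ⟨rfl, hbo⟩)
    have hlen := len_ne_one_of_two_mem hxm hom
    have hA : ¬ (PySem.Set.len (loopA board [(x, y)] visitboard 1 PySem.Set.empty).2.2 = 1) := by
      simp only [PySem.Set.len]
      exact_mod_cast hlen
    rw [if_neg hA]
    simp [e1, e2]
  · have e1 := hBX.2 hbx
    have e2 : (go board (board.length : Int) (nbrsB x y) (visitboard, 1, false, false)).val.2.2.2 = false := by
      rw [Bool.eq_false_iff]
      intro h
      exact hbo (hBO.1 h)
    have hl : (loopA board [(x, y)] visitboard 1 PySem.Set.empty).2.2 = ["X"] := by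
      apply nodup_single_of_mem_iff a4
      intro s
      rw [hmem s]
      constructor
      · rintro (⟨rfl, _⟩ | ⟨rfl, h⟩)
        · rfl
        · exact absurd h hbo
      · rintro rfl
        exact Or.inl ⟨rfl, hbx⟩
    rw [hl, if_pos (show PySem.Set.len ["X"] = 1 by rfl)]
    simp [e1, e2]
  · have e2 := hBO.2 hbo
    have e1 : (go board (board.length : Int) (nbrsB x y) (visitboard, 1, false, false)).val.2.2.1 = false := by
      rw [Bool.eq_false_iff]
      intro h
      exact hbx (hBX.1 h)
    have hl : (loopA board [(x, y)] visitboard 1 PySem.Set.empty).2.2 = ["O"] := by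
      apply nodup_single_of_mem_iff a4
      intro s
      rw [hmem s]
      constructor
      · rintro (⟨rfl, h⟩ | ⟨rfl, _⟩)
        · exact absurd h hbx
        · rfl
      · rintro rfl
        exact Or.inr ⟨rfl, hbo⟩
    rw [hl, if_pos (show PySem.Set.len ["O"] = 1 by rfl)]
    simp [e1, e2]
  · have e1 : (go board (board.length : Int) (nbrsB x y) (visitboard, 1, false, false)).val.2.2.1 = false := by
      rw [Bool.eq_false_iff]
      intro h
      exact hbx (hBX.1 h)
    have e2 : (go board (board.length : Int) (nbrsB x y) (visitboard, 1, false, false)).val.2.2.2 = false := by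
      rw [Bool.eq_false_iff]
      intro h
      exact hbo (hBO.1 h)
    have hl : (loopA board [(x, y)] visitboard 1 PySem.Set.empty).2.2 = [] := by
      rw [List.eq_nil_iff_forall_not_mem]
      intro s hs
      rcases (hmem s).1 hs with ⟨_, h⟩ | ⟨_, h⟩
      · exact hbx h
      · exact hbo h
    rw [hl, if_neg (show ¬ (PySem.Set.len ([] : List String) = 1) by decide)]
    simp [e1, e2]

-- ===== VERDICT (by name: the statement is the Claim_ definition above) =====
theorem bfs_spec : Claim_equal_bfs := by
  intro board x y visitboard _ _
  unfold Spec_bfs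
  exact bfs_equal_all board x y visitboard
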